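-- pv_equiv track=rewrite | github.com/hm-ysjiang/RushHourPuzzle | generator.py | occupied
-- ===== SOURCE A (Python) =====
-- def occupied(cars, r, c):
--     if r < 0 or r >= 5 or c < 0 or c >= 5:
--         return True
--     if r == 2 and c >= cars[0][2]:
--         return True
--     for row, col, length, orient in cars:
--         if row == r and orient == 1 and col <= c < col + length:
--             return True
--         if col == c and orient == 2 and row <= r < row + length:
--             return True
--     return False
-- ===== SOURCE B (Python) =====
-- def occupied(cars, r, c):
--     if r < 0 or r >= 5 or c < 0 or c >= 5:
--         return True
--     if r == 2 and c >= cars[0][2]: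
--         return True
--     cells = set()
--     for row, col, length, orient in cars:
--         if orient == 1:
--             for k in range(length):
--                 cells.add((row, col + k))
--         elif orient == 2:
--             for k in range(length):
--                 cells.add((row + k, col))
--     return (r, c) in cells
-- ===== Notes on version B (the rewrite author's own statement) =====
-- stated objective: alternative
-- what changed: Replaces the per-car early-return predicate scan with building a set of all occupied (row,col) cells once and answering by a single membership test.
import Mathlib
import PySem

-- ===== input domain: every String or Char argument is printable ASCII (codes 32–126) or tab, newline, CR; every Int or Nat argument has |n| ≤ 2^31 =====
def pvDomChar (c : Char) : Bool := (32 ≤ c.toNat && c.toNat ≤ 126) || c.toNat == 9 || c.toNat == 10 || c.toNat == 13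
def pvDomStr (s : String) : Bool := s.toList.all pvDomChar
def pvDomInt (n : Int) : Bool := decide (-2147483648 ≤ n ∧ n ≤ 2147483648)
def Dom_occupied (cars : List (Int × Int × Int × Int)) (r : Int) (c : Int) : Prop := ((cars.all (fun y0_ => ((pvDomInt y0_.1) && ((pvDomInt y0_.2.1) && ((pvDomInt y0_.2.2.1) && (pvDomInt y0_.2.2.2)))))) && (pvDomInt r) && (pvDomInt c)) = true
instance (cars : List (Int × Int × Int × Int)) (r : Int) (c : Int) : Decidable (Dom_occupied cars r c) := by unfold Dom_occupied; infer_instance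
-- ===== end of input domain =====

-- B replaces A's per-car early-return scan by building the set of occupied cells once
-- and testing membership (alternative decomposition; same cost class).

-- ===== PORT A =====
-- A's for-loop with early return, car by car
def occLoopA (r c : Int) : List (Int × Int × Int × Int) → Bool
  | [] => false
  | (row, col, len, o) :: rest =>
    if row = r ∧ o = 1 ∧ col ≤ c ∧ c < col + len then true
    else if col = c ∧ o = 2 ∧ row ≤ r ∧ r < row + len then true
    else occLoopA r c rest

def occupied (cars : List (Int × Int × Int × Int)) (r : Int) (c : Int) : Bool :=
  if r < 0 ∨ 5 ≤ r ∨ c < 0 ∨ 5 ≤ c then true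
  -- cars[0][2]: Python raises IndexError on [] here; that input is excluded by Pre_ (headD value is never reached inside Pre_)
  else if r = 2 ∧ (cars.headD (0, 0, 0, 0)).2.2.1 ≤ c then true
  else occLoopA r c cars

-- ===== PORT B =====
-- the set of cells covered by the cars (B's `cells`)
def cellsOf (cars : List (Int × Int × Int × Int)) : PySem.Set (Int × Int) :=
  cars.foldl (fun s car =>
    match car with
    | (row, col, len, o) =>
      if o = 1 then (PySem.List.pyRange 0 len 1).foldl (fun s k => PySem.Set.add s (row, col + k)) s
      else if o = 2 then (PySem.List.pyRange 0 len 1).foldl (fun s k => PySem.Set.add s (row + k, col)) s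
      else s) PySem.Set.empty

def occupied_alt (cars : List (Int × Int × Int × Int)) (r : Int) (c : Int) : Bool :=
  if r < 0 ∨ 5 ≤ r ∨ c < 0 ∨ 5 ≤ c then true
  -- same cars[0][2] access as A; excluded by Pre_ on []
  else if r = 2 ∧ (cars.headD (0, 0, 0, 0)).2.2.1 ≤ c then true
  else PySem.Set.contains (cellsOf cars) (r, c)

-- ===== PRECONDITION & SPEC =====
-- Pre_ excludes exactly the inputs where Python A raises IndexError (cars == [] with r == 2 and c in range, reaching cars[0]); B raises identically there.
def Pre_occupied (cars : List (Int × Int × Int × Int)) (r : Int) (c : Int) : Prop :=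
  ¬ (cars = [] ∧ r = 2 ∧ 0 ≤ c ∧ c < 5)
instance (cars : List (Int × Int × Int × Int)) (r : Int) (c : Int) : Decidable (Pre_occupied cars r c) := by unfold Pre_occupied; infer_instance

def pvWitness_occupied : (List (Int × Int × Int × Int)) × Int × Int := ([(2, 0, 2, 1), (0, 4, 3, 2)], 2, 1)

def Spec_occupied (cars : List (Int × Int × Int × Int)) (r : Int) (c : Int) (out : Bool) : Prop := out = occupied_alt cars r c
instance (cars : List (Int × Int × Int × Int)) (r : Int) (c : Int) (out : Bool) : Decidable (Spec_occupied cars r c out) := by unfold Spec_occupied; infer_instance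

-- ===== CLAIM (what is proved, stated in full; the proofs are below) =====
def Claim_equal_occupied : Prop := ∀ (cars : List (Int × Int × Int × Int)) (r : Int) (c : Int), Dom_occupied cars r c → Pre_occupied cars r c → Spec_occupied cars r c (occupied cars r c)

-- ===== LEMMAS AND PROOFS =====

-- does one car cover cell (r,c)?
def carHit (car : Int × Int × Int × Int) (r c : Int) : Prop :=
  (car.1 = r ∧ car.2.2.2 = 1 ∧ car.2.1 ≤ c ∧ c < car.2.1 + car.2.2.1) ∨
  (car.2.1 = c ∧ car.2.2.2 = 2 ∧ car.1 ≤ r ∧ r < car.1 + car.2.2.1)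

theorem occLoopA_iff (r c : Int) (cars : List (Int × Int × Int × Int)) :
    occLoopA r c cars = true ↔ ∃ car ∈ cars, carHit car r c := by
  induction cars with
  | nil => simp [occLoopA]
  | cons car rest ih =>
    obtain ⟨row, col, len, o⟩ := car
    simp only [occLoopA]
    split_ifs with h1 h2 <;>
      simp only [ih, List.mem_cons, exists_eq_or_imp, carHit] <;> simp <;> omega

theorem mem_foldl_add (f : Int → Int × Int) (L : List Int) (x : Int × Int) :
    ∀ s : PySem.Set (Int × Int),
      (x ∈ L.foldl (fun s k => PySem.Set.add s (f k)) s) ↔ x ∈ s ∨ ∃ k ∈ L, x = f k := by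
  induction L with
  | nil => simp
  | cons a L ih =>
    intro s
    simp only [List.foldl_cons, ih, PySem.Set.mem_add, List.mem_cons]
    constructor
    · rintro (⟨hs | he⟩ | ⟨k, hk, hx⟩)
      · exact Or.inl hs
      · exact Or.inr ⟨a, Or.inl rfl, he⟩
      · exact Or.inr ⟨k, Or.inr hk, hx⟩
    · rintro (hs | ⟨k, rfl | hk, hx⟩)
      · exact Or.inl (Or.inl hs)
      · exact Or.inl (Or.inr hx)
      · exact Or.inr ⟨k, hk, hx⟩

theorem mem_cellsOf_aux (r c : Int) (cars : List (Int × Int × Int × Int)) :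
    ∀ s : PySem.Set (Int × Int),
      ((r, c) ∈ cars.foldl (fun s car =>
        match car with
        | (row, col, len, o) =>
          if o = 1 then (PySem.List.pyRange 0 len 1).foldl (fun s k => PySem.Set.add s (row, col + k)) s
          else if o = 2 then (PySem.List.pyRange 0 len 1).foldl (fun s k => PySem.Set.add s (row + k, col)) s
          else s) s)
      ↔ (r, c) ∈ s ∨ ∃ car ∈ cars, carHit car r c := by
  induction cars with
  | nil => simp
  | cons car rest ih =>
    obtain ⟨row, col, len, o⟩ := car
    intro s
    simp only [List.foldl_cons, ih]
    rw [List.exists_mem_cons_iff]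
    have hone : ((r, c) ∈ (PySem.List.pyRange 0 len 1).foldl (fun s k => PySem.Set.add s (row, col + k)) s)
        ↔ (r, c) ∈ s ∨ (row = r ∧ col ≤ c ∧ c < col + len) := by
      rw [mem_foldl_add]
      simp only [PySem.List.mem_pyRange_one, Prod.mk.injEq]
      constructor
      · rintro (hs | ⟨k, ⟨h0, hk⟩, hr, hc⟩)
        · exact Or.inl hs
        · exact Or.inr ⟨hr.symm, by omega⟩
      · rintro (hs | ⟨hr, h1, h2⟩)
        · exact Or.inl hs
        · exact Or.inr ⟨c - col, by omega, hr.symm, by omega⟩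
    have htwo : ((r, c) ∈ (PySem.List.pyRange 0 len 1).foldl (fun s k => PySem.Set.add s (row + k, col)) s)
        ↔ (r, c) ∈ s ∨ (col = c ∧ row ≤ r ∧ r < row + len) := by
      rw [mem_foldl_add]
      simp only [PySem.List.mem_pyRange_one, Prod.mk.injEq]
      constructor
      · rintro (hs | ⟨k, ⟨h0, hk⟩, hr, hc⟩)
        · exact Or.inl hs
        · exact Or.inr ⟨hc.symm, by omega⟩
      · rintro (hs | ⟨hc, h1, h2⟩)
        · exact Or.inl hs
        · exact Or.inr ⟨r - row, by omega, by omega, hc.symm⟩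
    split_ifs with h1 h2
    · rw [hone]
      subst h1
      have hfc : carHit (row, col, len, 1) r c ↔ (row = r ∧ col ≤ c ∧ c < col + len) := by
        simp [carHit]
      rw [hfc]
      exact or_assoc
    · rw [htwo]
      subst h2
      have hfc : carHit (row, col, len, 2) r c ↔ (col = c ∧ row ≤ r ∧ r < row + len) := by
        simp [carHit]
      rw [hfc]
      exact or_assoc
    · have hfc : carHit (row, col, len, o) r c ↔ False := by
        simp [carHit, h1, h2]
      rw [hfc, false_or]

theorem mem_cellsOf (r c : Int) (cars : List (Int × Int × Int × Int)) :
    (r, c) ∈ cellsOf cars ↔ ∃ car ∈ cars, carHit car r c := by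
  unfold cellsOf
  rw [mem_cellsOf_aux]
  simp [PySem.Set.empty]

theorem loop_eq_contains (r c : Int) (cars : List (Int × Int × Int × Int)) :
    occLoopA r c cars = PySem.Set.contains (cellsOf cars) (r, c) := by
  have hci := PySem.Set.contains_iff (cellsOf cars) (r, c)
  rcases h : occLoopA r c cars with _ | _
  · symm
    by_contra hc
    have hm : (r, c) ∈ cellsOf cars := hci.mp (by simpa using hc)
    rw [mem_cellsOf] at hm
    exact absurd ((occLoopA_iff r c cars).mpr hm) (by simp [h])
  · exact (hci.mpr ((mem_cellsOf r c cars).mpr ((occLoopA_iff r c cars).mp h))).symm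

-- ===== VERDICT (by name: the statement is the Claim_ definition above) =====
theorem occupied_spec : Claim_equal_occupied := by
  intro cars r c _ _
  unfold Spec_occupied occupied occupied_alt
  split_ifs with h1 h2
  · rfl
  · rfl
  · exact loop_eq_contains r c cars
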